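-- pv_equiv track=rewrite | github.com/HotelASP/Recon | run_recon.py | _summarize_port_sequence
-- ===== SOURCE A (Python) =====
-- from typing import Dict, Iterable, List, Mapping, Optional, Sequence, Set, TextIO, Tuple, Union
--
-- def _summarize_port_sequence(ports: Sequence[int]) -> Optional[str]:
--     # Generate a compact range-based representation of port lists so stages
--     # with many contiguous ports don't flood the console with dozens of lines.
--
--     if not ports:
--         return None
--
--     if not all(isinstance(port, int) for port in ports):
--         return None
--
--     sorted_ports = sorted(ports)
--     ranges = []
--     start = previous = sorted_ports[0]
--
--     for port in sorted_ports[1:]: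
--         if port == previous + 1:
--             previous = port
--             continue
--
--         ranges.append((start, previous))
--         start = previous = port
--
--     ranges.append((start, previous))
--
--     range_strings = []
--     for start, end in ranges:
--         if start == end:
--             range_strings.append(str(start))
--         else:
--             range_strings.append(f"{start}-{end}")
--
--     joined = ", ".join(range_strings)
--     total = len(sorted_ports)
--     return f"ports {joined} ({total} total)"
-- ===== SOURCE B (Python) =====
-- def _summarize_port_sequence(ports):
--     if not ports:
--         return None
--     if not all(isinstance(port, int) for port in ports):
--         return None
--     sp = sorted(ports)
--     # break pairs: each adjacent pair (a, b) where b does not continue a's run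
--     breaks = [(a, b) for a, b in zip(sp, sp[1:]) if b != a + 1]
--     starts = [sp[0]] + [b for a, b in breaks]
--     ends = [a for a, b in breaks] + [sp[-1]]
--     parts = [str(s) if s == e else f"{s}-{e}" for s, e in zip(starts, ends)]
--     return f"ports {', '.join(parts)} ({len(sp)} total)"
-- ===== Notes on version B (the rewrite author's own statement) =====
-- stated objective: alternative
-- what changed: A threads (ranges, start, previous) state through an explicit loop and formats in a second pass; B is stateless and declarative: it pairwise-zips the sorted list with its own tail to pick out the break pairs, derives the run starts and run ends as two comprehensions from those pairs, and zips them into the formatted parts.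
import Mathlib
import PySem

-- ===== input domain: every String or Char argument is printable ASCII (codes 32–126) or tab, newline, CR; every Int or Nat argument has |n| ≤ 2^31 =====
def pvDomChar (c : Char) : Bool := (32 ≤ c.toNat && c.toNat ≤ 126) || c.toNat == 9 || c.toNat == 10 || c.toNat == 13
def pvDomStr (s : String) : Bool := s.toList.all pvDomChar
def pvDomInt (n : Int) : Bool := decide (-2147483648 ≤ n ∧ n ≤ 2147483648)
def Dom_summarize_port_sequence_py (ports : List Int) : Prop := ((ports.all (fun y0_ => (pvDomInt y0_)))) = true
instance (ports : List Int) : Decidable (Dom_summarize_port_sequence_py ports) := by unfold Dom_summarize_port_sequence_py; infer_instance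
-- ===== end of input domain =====

-- B replaces A's stateful (ranges, start, previous) loop by a stateless staged computation:
-- break pairs from zip(sp, sp[1:]), run starts/ends as comprehensions, zipped and formatted
-- (objective: alternative; same cost).

-- ===== PORT A =====
-- the loop body over sorted_ports[1:], state = (ranges, start, previous)
def pvStepA (st : List (Int × Int) × Int × Int) (port : Int) : List (Int × Int) × Int × Int :=
  if port = st.2.2 + 1 then (st.1, st.2.1, port)
  else (st.1 ++ [(st.2.1, st.2.2)], port, port)

def summarize_port_sequence_py (ports : List Int) : Option String :=
  if ports = [] then none
  else if (ports.all fun _port => true) = false then none   -- all(isinstance(port, int)): always true on List Int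
  else
    match PySem.List.sorted ports (fun x => x) false with
    | [] => none   -- unreachable: sorted_ports[0] exists since ports ≠ []
    | h :: t =>
      let fin := t.foldl pvStepA ([], h, h)
      let ranges := fin.1 ++ [(fin.2.1, fin.2.2)]
      let range_strings := ranges.map (fun r =>
        if r.1 = r.2 then PySem.Int.toStr r.1
        else PySem.Int.toStr r.1 ++ "-" ++ PySem.Int.toStr r.2)
      some ("ports " ++ PySem.Str.join ", " range_strings ++ " (" ++
        PySem.Int.toStr ((h :: t).length : Int) ++ " total)")

-- ===== PORT B =====
def summarize_port_sequence_py_alt (ports : List Int) : Option String :=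
  if ports = [] then none
  else if (ports.all fun _port => true) = false then none   -- all(isinstance(port, int)): always true on List Int
  else
    let sp := PySem.List.sorted ports (fun x => x) false
    match sp with
    | [] => none   -- unreachable: sp[0]/sp[-1] exist since ports ≠ []
    | h :: t =>
      -- breaks = [(a, b) for a, b in zip(sp, sp[1:]) if b != a + 1]
      let breaks := (List.zip (h :: t) (PySem.List.slice (h :: t) (some 1) none)).filter
        (fun ab => !decide (ab.2 = ab.1 + 1))
      -- starts = [sp[0]] + [b for a, b in breaks]
      let starts := h :: breaks.map Prod.snd
      -- ends = [a for a, b in breaks] + [sp[-1]]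
      let ends := breaks.map Prod.fst ++ [(h :: t).getLast (by simp)]
      let parts := (List.zip starts ends).map (fun se =>
        if se.1 = se.2 then PySem.Int.toStr se.1
        else PySem.Int.toStr se.1 ++ "-" ++ PySem.Int.toStr se.2)
      some ("ports " ++ PySem.Str.join ", " parts ++ " (" ++
        PySem.Int.toStr ((h :: t).length : Int) ++ " total)")

-- ===== PRECONDITION & SPEC =====
def Spec_summarize_port_sequence_py (ports : List Int) (out : Option String) : Prop := out = summarize_port_sequence_py_alt ports
instance (ports : List Int) (out : Option String) : Decidable (Spec_summarize_port_sequence_py ports out) := by unfold Spec_summarize_port_sequence_py; infer_instance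

-- ===== CLAIM =====
def Claim_equal_summarize_port_sequence_py : Prop := ∀ (ports : List Int), Dom_summarize_port_sequence_py ports → Spec_summarize_port_sequence_py ports (summarize_port_sequence_py ports)

-- ===== LEMMAS AND PROOFS =====

-- proof-only: peel the maximal consecutive run starting from p; return (run end, remainder)
def pvPeel : Int → List Int → Int × List Int
  | p, [] => (p, [])
  | p, x :: xs => if x = p + 1 then pvPeel x xs else (p, x :: xs)

theorem pvPeel_len : ∀ (xs : List Int) (p : Int), (pvPeel p xs).2.length ≤ xs.length := by
  intro xs
  induction xs with
  | nil => intro p; simp [pvPeel]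
  | cons x xs ih =>
    intro p
    simp only [pvPeel]
    split
    · exact Nat.le_succ_of_le (ih x)
    · simp

-- proof-only: the run boundaries as (start, end) pairs
def pvRunsP : List Int → List (Int × Int)
  | [] => []
  | x :: xs => (x, (pvPeel x xs).1) :: pvRunsP (pvPeel x xs).2
termination_by l => l.length
decreasing_by exact Nat.lt_succ_of_le (pvPeel_len xs x)

def pvFmt (r : Int × Int) : String :=
  if r.1 = r.2 then PySem.Int.toStr r.1
  else PySem.Int.toStr r.1 ++ "-" ++ PySem.Int.toStr r.2

-- proof-only: B's break pairs / starts / ends over an arbitrary list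
def pvBrk (l : List Int) : List (Int × Int) :=
  (List.zip l l.tail).filter (fun ab => !decide (ab.2 = ab.1 + 1))

-- A's loop, run from any state, finalizes to the already-emitted ranges plus the runs of the rest
theorem pvFoldA_eq (xs : List Int) : ∀ (acc : List (Int × Int)) (s p : Int),
    (xs.foldl pvStepA (acc, s, p)).1 ++ [((xs.foldl pvStepA (acc, s, p)).2.1, (xs.foldl pvStepA (acc, s, p)).2.2)]
      = acc ++ (s, (pvPeel p xs).1) :: pvRunsP (pvPeel p xs).2 := by
  induction xs with
  | nil => intro acc s p; simp [pvPeel, pvRunsP]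
  | cons x xs ih =>
    intro acc s p
    simp only [List.foldl_cons, pvStepA, pvPeel]
    by_cases h : x = p + 1
    · simp only [if_pos h]
      exact ih acc s x
    · simp only [if_neg h]
      rw [ih (acc ++ [(s, p)]) x x]
      simp [pvRunsP]

-- the break pairs of p::xs: none inside the first run, then (run end, head of remainder), then the rest's breaks
theorem pvBrk_cons : ∀ (xs : List Int) (p : Int),
    pvBrk (p :: xs) = match (pvPeel p xs).2 with
      | [] => []
      | y :: ys => ((pvPeel p xs).1, y) :: pvBrk (y :: ys) := by
  intro xs
  induction xs with
  | nil => intro p; simp [pvBrk, pvPeel]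
  | cons x xs ih =>
    intro p
    simp only [pvPeel]
    by_cases h : x = p + 1
    · simp only [if_pos h]
      rw [← ih x]
      simp [pvBrk, h]
    · simp only [if_neg h]
      simp [pvBrk, h]

-- the last element of p::xs, through the peel of its first run
theorem pvLast_cons : ∀ (xs : List Int) (p : Int),
    (p :: xs).getLast? = some (((pvPeel p xs).2.getLast?).getD (pvPeel p xs).1) := by
  intro xs
  induction xs with
  | nil => intro p; simp [pvPeel]
  | cons x xs ih =>
    intro p
    simp only [pvPeel]
    by_cases h : x = p + 1
    · simp only [if_pos h]
      rw [← ih x]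
      simp
    · simp only [if_neg h]
      simp [ih x]

-- main bridge: B's zip of starts and ends equals the run pairs
theorem pvZip_eq_runs : ∀ (xs : List Int) (p : Int),
    List.zip (p :: (pvBrk (p :: xs)).map Prod.snd)
             ((pvBrk (p :: xs)).map Prod.fst ++ [((p :: xs).getLast?).getD 0])
      = pvRunsP (p :: xs) := by
  intro xs p
  induction hn : (p :: xs).length using Nat.strong_induction_on generalizing p xs with
  | _ n ih =>
    rw [pvBrk_cons]
    cases hr : (pvPeel p xs).2 with
    | nil =>
      have hl := pvLast_cons xs p
      rw [hr] at hl
      simp at hl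
      simp [pvRunsP, hr, hl]
    | cons y ys =>
      have hl := pvLast_cons xs p
      rw [hr] at hl
      have hy := pvLast_cons ys y
      simp only [List.map_cons]
      have hlen : (y :: ys).length < n := by
        have h1 := pvPeel_len xs p
        rw [hr] at h1
        simp only [List.length_cons] at hn h1 ⊢
        omega
      have := ih (y :: ys).length hlen ys y rfl
      rw [pvBrk_cons] at this ⊢
      simp only [List.zip_cons_cons, List.cons_append]
      rw [pvRunsP, hr]
      congr 1
      · have h1 : ((y :: ys).getLast?).getD 0 = ((pvPeel y ys).2.getLast?).getD (pvPeel y ys).1 := by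
          rw [hy]; rfl
        have h2 : ((p :: xs).getLast?).getD 0 = ((y :: ys).getLast?).getD 0 := by
          rw [hl, hy]; rfl
        rw [h2, ← this]

-- ===== VERDICT =====
theorem summarize_port_sequence_py_spec : Claim_equal_summarize_port_sequence_py := by
  intro ports _
  unfold Spec_summarize_port_sequence_py summarize_port_sequence_py summarize_port_sequence_py_alt
  by_cases hnil : ports = []
  · simp [hnil]
  · simp only [if_neg hnil]
    cases hs : PySem.List.sorted ports (fun x => x) false with
    | nil => simp
    | cons h t =>
      simp only [PySem.List.slice_from_one, List.tail_cons]
      rw [pvFoldA_eq t [] h h]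
      have hlast : (h :: t).getLast (by simp) = ((h :: t).getLast?).getD 0 := by
        rw [List.getLast?_eq_some_getLast (by simp)]; rfl
      simp only [List.nil_append]
      have key := pvZip_eq_runs t h
      unfold pvBrk at key
      simp only [List.tail_cons] at key
      rw [hlast, key]
      rw [show ((h, (pvPeel h t).1) :: pvRunsP (pvPeel h t).2) = pvRunsP (h :: t) from by rw [pvRunsP]]
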